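-- pv_equiv track=rewrite | github.com/rohith-polisetty/vintervu | vintervu-improved.py | infer_branch
-- ===== SOURCE A (Python) =====
-- def infer_branch(skills):
--     skill_set = set([skill.lower() for skill in skills])
--
--     if any(skill in skill_set for skill in ['python', 'java', 'c++', 'javascript', 'sql', 'machine learning', 'aws', 'react', 'nodejs']):
--         return 'Computer Science'
--     elif any(skill in skill_set for skill in ['matlab', 'vlsi', 'analog circuits', 'digital logic', 'embedded']):
--         return 'Electronics'
--     elif any(skill in skill_set for skill in ['plc', 'scada', 'power systems', 'control systems']):
--         return 'Electrical'
--     elif any(skill in skill_set for skill in ['autocad', 'staad', 'concrete', 'structural']):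
--         return 'Civil'
--     elif any(skill in skill_set for skill in ['thermodynamics', 'fluid mechanics', 'mechanical design']):
--         return 'Mechanical'
--     else:
--         return 'General Engineering'
-- ===== SOURCE B (Python) =====
-- _KW2BRANCH = {
--     'python': 'Computer Science', 'java': 'Computer Science', 'c++': 'Computer Science',
--     'javascript': 'Computer Science', 'sql': 'Computer Science', 'machine learning': 'Computer Science',
--     'aws': 'Computer Science', 'react': 'Computer Science', 'nodejs': 'Computer Science',
--     'matlab': 'Electronics', 'vlsi': 'Electronics', 'analog circuits': 'Electronics',
--     'digital logic': 'Electronics', 'embedded': 'Electronics',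
--     'plc': 'Electrical', 'scada': 'Electrical', 'power systems': 'Electrical', 'control systems': 'Electrical',
--     'autocad': 'Civil', 'staad': 'Civil', 'concrete': 'Civil', 'structural': 'Civil',
--     'thermodynamics': 'Mechanical', 'fluid mechanics': 'Mechanical', 'mechanical design': 'Mechanical',
-- }
-- _PRIORITY = ['Computer Science', 'Electronics', 'Electrical', 'Civil', 'Mechanical']
--
-- def infer_branch(skills):
--     skill_set = {skill.lower() for skill in skills}
--     matched = {_KW2BRANCH[s] for s in skill_set if s in _KW2BRANCH}
--     for branch in _PRIORITY:
--         if branch in matched: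
--             return branch
--     return 'General Engineering'
-- ===== Notes on version B (the rewrite author's own statement) =====
-- stated objective: idiomatic
-- what changed: Replaced the five chained per-branch keyword scans with a keyword-to-branch dict built once, a single pass over the lowered skills collecting matched branches, and a priority-list resolution pass.
import Mathlib
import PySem

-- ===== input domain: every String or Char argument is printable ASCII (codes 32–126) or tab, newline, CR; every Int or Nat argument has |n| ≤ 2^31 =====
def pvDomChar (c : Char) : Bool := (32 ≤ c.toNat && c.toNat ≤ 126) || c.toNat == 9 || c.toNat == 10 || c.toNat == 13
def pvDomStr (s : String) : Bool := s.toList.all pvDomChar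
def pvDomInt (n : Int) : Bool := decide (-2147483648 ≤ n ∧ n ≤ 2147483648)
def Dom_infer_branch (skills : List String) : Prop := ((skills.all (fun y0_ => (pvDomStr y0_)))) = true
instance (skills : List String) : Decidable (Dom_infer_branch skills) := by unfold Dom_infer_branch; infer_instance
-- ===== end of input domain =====

-- B replaces A's five chained per-branch keyword scans by one keyword→branch dict, a single
-- collection pass over the lowered skills, and a priority-list resolution (objective: idiomatic).

-- ===== PORT A =====
def infer_branch (skills : List String) : String :=
  let skill_set : PySem.Set String := PySem.Set.ofList (skills.map (fun skill => PySem.Str.lower skill))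
  if (["python", "java", "c++", "javascript", "sql", "machine learning", "aws", "react", "nodejs"].any
      (fun skill => PySem.Set.contains skill_set skill)) then "Computer Science"
  else if (["matlab", "vlsi", "analog circuits", "digital logic", "embedded"].any
      (fun skill => PySem.Set.contains skill_set skill)) then "Electronics"
  else if (["plc", "scada", "power systems", "control systems"].any
      (fun skill => PySem.Set.contains skill_set skill)) then "Electrical"
  else if (["autocad", "staad", "concrete", "structural"].any
      (fun skill => PySem.Set.contains skill_set skill)) then "Civil"
  else if (["thermodynamics", "fluid mechanics", "mechanical design"].any
      (fun skill => PySem.Set.contains skill_set skill)) then "Mechanical"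
  else "General Engineering"

-- ===== PORT B =====
def kw2branch : PySem.Dict String String := PySem.Dict.mk
  [("python", "Computer Science"), ("java", "Computer Science"), ("c++", "Computer Science"),
   ("javascript", "Computer Science"), ("sql", "Computer Science"), ("machine learning", "Computer Science"),
   ("aws", "Computer Science"), ("react", "Computer Science"), ("nodejs", "Computer Science"),
   ("matlab", "Electronics"), ("vlsi", "Electronics"), ("analog circuits", "Electronics"),
   ("digital logic", "Electronics"), ("embedded", "Electronics"),
   ("plc", "Electrical"), ("scada", "Electrical"), ("power systems", "Electrical"), ("control systems", "Electrical"),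
   ("autocad", "Civil"), ("staad", "Civil"), ("concrete", "Civil"), ("structural", "Civil"),
   ("thermodynamics", "Mechanical"), ("fluid mechanics", "Mechanical"), ("mechanical design", "Mechanical")]

def priorityList : List String := ["Computer Science", "Electronics", "Electrical", "Civil", "Mechanical"]

def infer_branch_alt (skills : List String) : String :=
  let skill_set : PySem.Set String := PySem.Set.ofList (skills.map (fun skill => PySem.Str.lower skill))
  -- matched = {_KW2BRANCH[s] for s in skill_set if s in _KW2BRANCH}  (a set: order-independent result)
  let matched : PySem.Set String := skill_set.foldl
    (fun m s => match kw2branch.get? s with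
      | some b => PySem.Set.add m b
      | none => m) PySem.Set.empty
  -- first branch of the priority list present in matched, else the default
  ((priorityList.find? (fun branch => PySem.Set.contains matched branch)).getD "General Engineering")

-- ===== PRECONDITION & SPEC =====
def Spec_infer_branch (skills : List String) (out : String) : Prop := out = infer_branch_alt skills
instance (skills : List String) (out : String) : Decidable (Spec_infer_branch skills out) := by unfold Spec_infer_branch; infer_instance

-- ===== CLAIM (what is proved, stated in full; the proofs are below) =====
def Claim_equal_infer_branch : Prop := ∀ (skills : List String), Dom_infer_branch skills → Spec_infer_branch skills (infer_branch skills)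

-- ===== LEMMAS AND PROOFS =====

-- membership in B's collection fold
theorem mem_matched_fold (L : List String) (m : PySem.Set String) (b : String) :
    b ∈ L.foldl (fun m s => match kw2branch.get? s with
      | some br => PySem.Set.add m br
      | none => m) m ↔ b ∈ m ∨ ∃ s ∈ L, kw2branch.get? s = some b := by
  induction L generalizing m with
  | nil => simp
  | cons x xs ih =>
    simp only [List.foldl_cons, ih]
    cases h : kw2branch.get? x with
    | none =>
      constructor
      · rintro (hm | hs)
        · exact Or.inl hm
        · refine Or.inr ?_; obtain ⟨s, hs1, hs2⟩ := hs; exact ⟨s, List.mem_cons_of_mem _ hs1, hs2⟩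
      · rintro (hm | ⟨s, hs1, hs2⟩)
        · exact Or.inl hm
        · rcases List.mem_cons.mp hs1 with rfl | hs1
          · exact absurd hs2 (by simp [h])
          · exact Or.inr ⟨s, hs1, hs2⟩
    | some br =>
      simp only [PySem.Set.mem_add]
      constructor
      · rintro ((hm | rfl) | hs)
        · exact Or.inl hm
        · exact Or.inr ⟨x, by simp, h⟩
        · refine Or.inr ?_; obtain ⟨s, hs1, hs2⟩ := hs; exact ⟨s, by simp [hs1], hs2⟩
      · rintro (hm | ⟨s, hs1, hs2⟩)
        · exact Or.inl (Or.inl hm)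
        · rcases List.mem_cons.mp hs1 with rfl | hs1
          · exact Or.inl (Or.inr (by rw [h] at hs2; exact (Option.some_inj.mp hs2).symm))
          · exact Or.inr ⟨s, hs1, hs2⟩

-- ===== VERDICT (by name: the statement is the Claim_ definition above) =====
-- the matched-branches fold tests a branch exactly where A's per-branch scan fires
theorem contains_fold_eq (S : List String) (b : String) (kws : List String)
    (hmap : ∀ s, kw2branch.get? s = some b ↔ s ∈ kws) :
    PySem.Set.contains (S.foldl (fun m s => match kw2branch.get? s with
      | some br => PySem.Set.add m br
      | none => m) PySem.Set.empty) b
      = kws.any (fun kw => PySem.Set.contains S kw) := by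
  rw [Bool.eq_iff_iff]
  simp only [PySem.Set.contains_iff, mem_matched_fold, PySem.Set.empty, List.not_mem_nil,
    false_or, List.any_eq_true, hmap]
  exact ⟨fun ⟨s, h1, h2⟩ => ⟨s, h2, h1⟩, fun ⟨s, h1, h2⟩ => ⟨s, h2, h1⟩⟩

theorem kw2branch_keys_nodup : kw2branch.keys.Nodup := by decide

theorem lookup_cs (s : String) : kw2branch.get? s = some "Computer Science" ↔
    s ∈ ["python", "java", "c++", "javascript", "sql", "machine learning", "aws", "react", "nodejs"] := by
  constructor
  · intro h
    have hm := PySem.Dict.mem_items_of_get?_eq_some (d := kw2branch) h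
    simp only [kw2branch, List.mem_cons, List.not_mem_nil, or_false, Prod.mk.injEq] at hm
    simp only [List.mem_cons, List.not_mem_nil, or_false]
    tauto
  · intro h
    simp only [List.mem_cons, List.not_mem_nil, or_false] at h
    rcases h with rfl | rfl | rfl | rfl | rfl | rfl | rfl | rfl | rfl <;>
      exact PySem.Dict.get?_of_mem_items (d := kw2branch) (by simp [kw2branch]) kw2branch_keys_nodup

theorem lookup_ece (s : String) : kw2branch.get? s = some "Electronics" ↔
    s ∈ ["matlab", "vlsi", "analog circuits", "digital logic", "embedded"] := by
  constructor
  · intro h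
    have hm := PySem.Dict.mem_items_of_get?_eq_some (d := kw2branch) h
    simp only [kw2branch, List.mem_cons, List.not_mem_nil, or_false, Prod.mk.injEq] at hm
    simp only [List.mem_cons, List.not_mem_nil, or_false]
    tauto
  · intro h
    simp only [List.mem_cons, List.not_mem_nil, or_false] at h
    rcases h with rfl | rfl | rfl | rfl | rfl <;>
      exact PySem.Dict.get?_of_mem_items (d := kw2branch) (by simp [kw2branch]) kw2branch_keys_nodup

theorem lookup_eee (s : String) : kw2branch.get? s = some "Electrical" ↔
    s ∈ ["plc", "scada", "power systems", "control systems"] := by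
  constructor
  · intro h
    have hm := PySem.Dict.mem_items_of_get?_eq_some (d := kw2branch) h
    simp only [kw2branch, List.mem_cons, List.not_mem_nil, or_false, Prod.mk.injEq] at hm
    simp only [List.mem_cons, List.not_mem_nil, or_false]
    tauto
  · intro h
    simp only [List.mem_cons, List.not_mem_nil, or_false] at h
    rcases h with rfl | rfl | rfl | rfl <;>
      exact PySem.Dict.get?_of_mem_items (d := kw2branch) (by simp [kw2branch]) kw2branch_keys_nodup

theorem lookup_civ (s : String) : kw2branch.get? s = some "Civil" ↔
    s ∈ ["autocad", "staad", "concrete", "structural"] := by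
  constructor
  · intro h
    have hm := PySem.Dict.mem_items_of_get?_eq_some (d := kw2branch) h
    simp only [kw2branch, List.mem_cons, List.not_mem_nil, or_false, Prod.mk.injEq] at hm
    simp only [List.mem_cons, List.not_mem_nil, or_false]
    tauto
  · intro h
    simp only [List.mem_cons, List.not_mem_nil, or_false] at h
    rcases h with rfl | rfl | rfl | rfl <;>
      exact PySem.Dict.get?_of_mem_items (d := kw2branch) (by simp [kw2branch]) kw2branch_keys_nodup

theorem lookup_mech (s : String) : kw2branch.get? s = some "Mechanical" ↔
    s ∈ ["thermodynamics", "fluid mechanics", "mechanical design"] := by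
  constructor
  · intro h
    have hm := PySem.Dict.mem_items_of_get?_eq_some (d := kw2branch) h
    simp only [kw2branch, List.mem_cons, List.not_mem_nil, or_false, Prod.mk.injEq] at hm
    simp only [List.mem_cons, List.not_mem_nil, or_false]
    tauto
  · intro h
    simp only [List.mem_cons, List.not_mem_nil, or_false] at h
    rcases h with rfl | rfl | rfl <;>
      exact PySem.Dict.get?_of_mem_items (d := kw2branch) (by simp [kw2branch]) kw2branch_keys_nodup

-- resolving the priority list is the five-way conditional on the membership tests
theorem find?_priority (p : String → Bool) :
    ((priorityList.find? p).getD "General Engineering") =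
    (if p "Computer Science" then "Computer Science"
     else if p "Electronics" then "Electronics"
     else if p "Electrical" then "Electrical"
     else if p "Civil" then "Civil"
     else if p "Mechanical" then "Mechanical"
     else "General Engineering") := by
  cases h1 : p "Computer Science" <;> cases h2 : p "Electronics" <;> cases h3 : p "Electrical" <;>
    cases h4 : p "Civil" <;> cases h5 : p "Mechanical" <;>
      simp [priorityList, List.find?, h1, h2, h3, h4, h5]

theorem infer_branch_spec : Claim_equal_infer_branch := by
  intro skills _
  unfold Spec_infer_branch infer_branch infer_branch_alt
  simp only []
  have e1 := contains_fold_eq (PySem.Set.ofList (skills.map (fun skill => PySem.Str.lower skill))) _ _ lookup_cs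
  have e2 := contains_fold_eq (PySem.Set.ofList (skills.map (fun skill => PySem.Str.lower skill))) _ _ lookup_ece
  have e3 := contains_fold_eq (PySem.Set.ofList (skills.map (fun skill => PySem.Str.lower skill))) _ _ lookup_eee
  have e4 := contains_fold_eq (PySem.Set.ofList (skills.map (fun skill => PySem.Str.lower skill))) _ _ lookup_civ
  have e5 := contains_fold_eq (PySem.Set.ofList (skills.map (fun skill => PySem.Str.lower skill))) _ _ lookup_mech
  rw [find?_priority]
  rw [e1, e2, e3, e4, e5]
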